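-- pv_equiv track=rewrite | github.com/GitMonsters/octotetrahedral-agi | arc-puzzle-catalog/re-arc/solves/18b65c1b/solver.py | transform
-- ===== SOURCE A (Python) =====
-- from collections import Counter
--
-- def transform(grid):
--     rows = len(grid)
--     cols = len(grid[0])
--
--     flat = [v for row in grid for v in row]
--     bg = Counter(flat).most_common(1)[0][0]
--
--     # Find complete row (all values non-background)
--     complete_row = None
--     for r in range(rows):
--         if all(grid[r][c] != bg for c in range(cols)):
--             complete_row = r
--             break
--
--     # Find complete column (all values non-background)
--     complete_col = None
--     if complete_row is None:
--         for c in range(cols):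
--             if all(grid[r][c] != bg for r in range(rows)):
--                 complete_col = c
--                 break
--
--     output = [row[:] for row in grid]
--
--     if complete_row is not None:
--         R = complete_row
--         for r in range(rows):
--             class_values = {}
--             for c in range(cols):
--                 if grid[r][c] != bg:
--                     cls = grid[R][c]
--                     if cls not in class_values:
--                         class_values[cls] = grid[r][c]
--             if class_values:
--                 for c in range(cols):
--                     cls = grid[R][c]
--                     output[r][c] = class_values.get(cls, bg)
--
--     elif complete_col is not None:
--         C = complete_col
--         for c in range(cols):
--             class_values = {}
--             for r in range(rows):
--                 if grid[r][c] != bg: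
--                     cls = grid[r][C]
--                     if cls not in class_values:
--                         class_values[cls] = grid[r][c]
--             if class_values:
--                 for r in range(rows):
--                     cls = grid[r][C]
--                     output[r][c] = class_values.get(cls, bg)
--
--     return output
-- ===== SOURCE B (Python) =====
-- from collections import Counter
--
-- def transform(grid):
--     w = len(grid[0])
--     flat = [v for row in grid for v in row]
--     bg = Counter(flat).most_common(1)[0][0]
--
--     def rewrite(g, ref):
--         # index the reference line once: class value -> list of its positions
--         pos = {}
--         for j, cls in enumerate(ref):
--             pos.setdefault(cls, []).append(j)
--         # each output cell = first non-bg value of its line among its class's positions, else bg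
--         return [[next((row[j] for j in pos[cls] if row[j] != bg), bg) for cls in ref]
--                 for row in g]
--
--     left = [row[:w] for row in grid]
--     for lrow in left:
--         if all(v != bg for v in lrow):
--             return [new + row[w:] for new, row in zip(rewrite(left, lrow), grid)]
--     t = [list(c) for c in zip(*left)]
--     for col in t:
--         if all(v != bg for v in col):
--             new_t = [list(r) for r in zip(*rewrite(t, col))]
--             return [new + row[w:] for new, row in zip(new_t, grid)]
--     return [list(r) for r in grid]
-- ===== Notes on version B (the rewrite author's own statement) =====
-- stated objective: alternative
-- what changed: Instead of A's per-row first-seen class->value dict built and applied by four symmetric in-place index loops, B slices off the width-w left block, builds a class->positions index of the reference line once, computes every output cell directly as the first non-background value of its line among its class's positions (transposing the block once for the column case), and reattaches row tails.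
-- outside the precondition, e.g. on transform([[1, 1], [1]]): A returns [[1, 1], [1]], B returns [[1, 1], [1]]; on transform([[1, 1], [2]]): A raises IndexError, B returns [[1], [2]]
import Mathlib
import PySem

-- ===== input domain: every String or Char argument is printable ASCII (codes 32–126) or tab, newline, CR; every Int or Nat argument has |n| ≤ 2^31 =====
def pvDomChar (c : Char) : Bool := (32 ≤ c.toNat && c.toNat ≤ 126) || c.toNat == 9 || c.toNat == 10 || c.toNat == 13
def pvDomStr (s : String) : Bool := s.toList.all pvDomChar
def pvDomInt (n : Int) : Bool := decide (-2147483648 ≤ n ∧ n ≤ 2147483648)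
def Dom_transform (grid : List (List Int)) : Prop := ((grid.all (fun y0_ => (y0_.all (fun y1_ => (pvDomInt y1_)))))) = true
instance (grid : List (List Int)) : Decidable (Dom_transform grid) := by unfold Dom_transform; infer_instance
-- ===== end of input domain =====

-- B replaces A's per-row first-seen class->value dicts and four symmetric in-place index loops by a
-- class->positions index of the reference line built once on the width-w left block; every output
-- cell is then the first non-background value of its line among its class's positions (transposing
-- the block once for the column case), with row tails beyond width w reattached at the end.

-- ===== PORT A =====
-- Counter(flat).most_common(1)[0][0]: the first-inserted key of maximal count (0 is never reached
-- inside Pre_, where flat is nonempty).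
def pvBg (flat : List Int) : Int :=
  match PySem.List.max? (PySem.Dict.counter flat).items (fun p => p.2) with
  | some p => p.1
  | none => 0

def transform (grid : List (List Int)) : List (List Int) :=
  let rows := grid.length
  let cols := (grid.headD []).length
  let flat := grid.flatMap (fun row => row)
  let bg := pvBg flat
  let get : Nat → Nat → Int := fun r c => (grid.getD r []).getD c 0
  match (List.range rows).find? (fun r => (List.range cols).all (fun c => get r c != bg)) with
  | some R =>
    (List.range rows).map (fun r =>
      let cv := (List.range cols).foldl (fun d c =>
        if get r c != bg then
          (if PySem.Dict.contains d (get R c) then d else d.insert (get R c) (get r c))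
        else d) PySem.Dict.empty
      if cv.items.isEmpty then grid.getD r []
      else (List.range cols).foldl (fun row c =>
        row.set c (PySem.Dict.getD cv (get R c) bg)) (grid.getD r []))
  | none =>
    match (List.range cols).find? (fun c => (List.range rows).all (fun r => get r c != bg)) with
    | some C =>
      (List.range cols).foldl (fun out c =>
        let cv := (List.range rows).foldl (fun d r =>
          if get r c != bg then
            (if PySem.Dict.contains d (get r C) then d else d.insert (get r C) (get r c))
          else d) PySem.Dict.empty
        if cv.items.isEmpty then out
        else (List.range rows).foldl (fun out r =>
          out.set r ((out.getD r []).set c (PySem.Dict.getD cv (get r C) bg))) out) grid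
    | none => grid

-- ===== PORT B =====
-- [list(col) for col in zip(*g)]
def pvZipStar (g : List (List Int)) : List (List Int) :=
  match g with
  | [] => []
  | r0 :: _ => (List.range ((g.map List.length).foldl min r0.length)).map
      (fun c => g.map (fun row => row.getD c 0))

-- pos = {}; for j, cls in enumerate(ref): pos.setdefault(cls, []).append(j)
def pvPos (ref : List Int) : PySem.Dict Int (List Nat) :=
  ref.zipIdx.foldl (fun d p => d.modify p.1 [] (fun js => js ++ [p.2])) PySem.Dict.empty

-- next((row[j] for j in js if row[j] != bg), bg)
def pvFirst (bg : Int) (row : List Int) (js : List Nat) : Int :=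
  match js.find? (fun j => row.getD j 0 != bg) with
  | some j => row.getD j 0
  | none => bg

def pvRewrite (bg : Int) (g : List (List Int)) (ref : List Int) : List (List Int) :=
  let pos := pvPos ref
  g.map (fun row => ref.map (fun cls => pvFirst bg row (PySem.Dict.getD pos cls [])))

def transform_alt (grid : List (List Int)) : List (List Int) :=
  let w := (grid.headD []).length
  let flat := grid.flatMap (fun row => row)
  let bg := pvBg flat
  -- row[:w] and row[w:] with 0 ≤ w are exactly take/drop
  let left := grid.map (fun row => row.take w)
  match left.find? (fun lrow => lrow.all (fun v => v != bg)) with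
  | some lrow => ((pvRewrite bg left lrow).zip grid).map (fun p => p.1 ++ p.2.drop w)
  | none =>
    let t := pvZipStar left
    match t.find? (fun col => col.all (fun v => v != bg)) with
    | some col => ((pvZipStar (pvRewrite bg t col)).zip grid).map (fun p => p.1 ++ p.2.drop w)
    | none => grid.map (fun row => row)

-- ===== PRECONDITION & SPEC =====
-- Pre_ keeps grids that are nonempty, contain at least one cell, and whose rows are all at least as
-- long as row 0 (row 0 fixes A's working width). Outside it A raises: IndexError reading a cell of a
-- row shorter than row 0, or IndexError on most_common of an empty cell pool — except that on some
-- short-row grids A's short-circuiting searches happen to find nothing and return the grid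
-- unchanged, and B returns the same unchanged grid there.
def Pre_transform (grid : List (List Int)) : Prop :=
  grid ≠ [] ∧ (∀ row ∈ grid, (grid.headD []).length ≤ row.length) ∧
    grid.flatMap (fun row => row) ≠ []
instance (grid : List (List Int)) : Decidable (Pre_transform grid) := by
  unfold Pre_transform; infer_instance
def pvWitness_transform : List (List Int) := [[1, 2], [3, 3]]
def Spec_transform (grid : List (List Int)) (out : List (List Int)) : Prop := out = transform_alt grid
instance (grid : List (List Int)) (out : List (List Int)) : Decidable (Spec_transform grid out) := by
  unfold Spec_transform; infer_instance

-- ===== CLAIM (what is proved, stated in full; the proofs are below) =====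
def Claim_equal_transform : Prop :=
  ∀ (grid : List (List Int)), Dom_transform grid → Pre_transform grid →
    Spec_transform grid (transform grid)

-- ===== LEMMAS AND PROOFS =====

-- a list map expressed as a map over its index range
theorem map_range_getD {α β : Type} (g : List α) (f : α → β) (d : α) :
    (List.range g.length).map (fun i => f (g.getD i d)) = g.map f := by
  apply List.ext_getElem (by simp)
  intro i h1 h2
  have hi : i < g.length := by simpa using h2
  simp [List.getElem?_eq_getElem hi]

-- a list `all` expressed over its index range
theorem all_range_getD {α : Type} (l : List α) (Q : α → Bool) (d : α) :
    (List.range l.length).all (fun c => Q (l.getD c d)) = l.all Q := by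
  have h := map_range_getD l (fun a => a) d
  rw [List.map_id'] at h
  conv_rhs => rw [← h]
  rw [List.all_map]
  rfl

theorem find?_congr {α : Type} (l : List α) (p q : α → Bool) (h : ∀ x ∈ l, p x = q x) :
    l.find? p = l.find? q := by
  induction l with
  | nil => rfl
  | cons a t ih =>
    rw [List.find?_cons, List.find?_cons, h a (List.mem_cons_self)]
    cases q a
    · exact ih (fun x hx => h x (List.mem_cons_of_mem _ hx))
    · rfl

theorem all_congr_mem {α : Type} (l : List α) (p q : α → Bool) (h : ∀ x ∈ l, p x = q x) :
    l.all p = l.all q := by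
  induction l with
  | nil => rfl
  | cons a t ih =>
    rw [List.all_cons, List.all_cons, h a (List.mem_cons_self),
      ih (fun x hx => h x (List.mem_cons_of_mem _ hx))]

-- a `match find?` rewritten through a pointwise-equal predicate and value function
theorem match_find_congr (l : List Nat) (p q : Nat → Bool) (f g : Nat → Int) (b : Int)
    (hp : ∀ x ∈ l, p x = q x) (hf : ∀ x ∈ l, f x = g x) :
    (match l.find? p with | some j => f j | none => b)
      = (match l.find? q with | some j => g j | none => b) := by
  rw [← find?_congr l p q hp]
  cases h : l.find? p with
  | none => rfl
  | some j => exact hf j (List.mem_of_find?_eq_some h)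

theorem find?_of_filter (l : List Nat) (q p : Nat → Bool) :
    (l.filter q).find? p = l.find? (fun x => q x && p x) := by
  induction l with
  | nil => rfl
  | cons a t ih =>
    by_cases h : q a = true <;> by_cases h2 : p a = true <;>
      simp [h, h2, ih]

theorem foldl_min_const (m : Nat) (l : List Nat) (h : ∀ x ∈ l, x = m) :
    l.foldl min m = m := by
  induction l with
  | nil => rfl
  | cons a t ih =>
    rw [List.foldl_cons, h a (List.mem_cons_self), min_self]
    exact ih (fun x hx => h x (List.mem_cons_of_mem _ hx))

theorem length_foldl_set (l : List Nat) (g : List (List Int) → Nat → List Int) :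
    ∀ out : List (List Int), (l.foldl (fun o r => o.set r (g o r)) out).length = out.length := by
  induction l with
  | nil => intro out; rfl
  | cons a t ih => intro out; rw [List.foldl_cons, ih]; simp

-- A's inner row-writing loop, cell by cell
theorem setRows_getElem? (v : Nat → Int) (c : Nat) (out : List (List Int)) :
    ∀ (n i : Nat),
      ((List.range n).foldl (fun o r => o.set r ((o.getD r []).set c (v r))) out)[i]? =
        if i < n then out[i]?.map (fun row => row.set c (v i)) else out[i]? := by
  intro n
  induction n with
  | zero => intro i; simp
  | succ n ih =>
    intro i
    rw [List.range_succ, List.foldl_append, List.foldl_cons, List.foldl_nil]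
    have hlen : ((List.range n).foldl
        (fun o r => o.set r ((o.getD r []).set c (v r))) out).length = out.length :=
      length_foldl_set _ _ _
    rw [List.getElem?_set]
    by_cases hni : n = i
    · subst hni
      have hgd : ((List.range n).foldl
          (fun o r => o.set r ((o.getD r []).set c (v r))) out).getD n [] = out.getD n [] := by
        rw [List.getD_eq_getElem?_getD, ih n, if_neg (by omega), ← List.getD_eq_getElem?_getD]
      rw [if_pos rfl, hgd, hlen]
      cases hout : out[n]? with
      | none =>
        have hlen2 : out.length ≤ n := by
          by_contra hc
          rw [List.getElem?_eq_getElem (by omega)] at hout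
          cases hout
        rw [if_neg (by omega), if_pos (by omega)]
        simp
      | some row =>
        have hlen2 : n < out.length := by
          by_contra hc
          rw [List.getElem?_eq_none (by omega)] at hout
          cases hout
        rw [if_pos hlen2, if_pos (by omega)]
        simp [List.getD_eq_getElem?_getD, hout]
    · rw [if_neg hni, ih i]
      by_cases hi : i < n
      · rw [if_pos hi, if_pos (by omega)]
      · rw [if_neg hi, if_neg (by omega)]

theorem length_foldl_rowset (E : Nat → Bool) (v : Nat → Int) (l : List Nat) :
    ∀ row : List Int,
      (l.foldl (fun r c => if E c then r else r.set c (v c)) row).length = row.length := by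
  induction l with
  | nil => intro row; rfl
  | cons a t ih =>
    intro row; rw [List.foldl_cons, ih]
    by_cases h : E a = true <;> simp [h]

-- the per-row effect of A's column loop, cell by cell
theorem rowCols_getElem? (E : Nat → Bool) (v : Nat → Int) (row : List Int) :
    ∀ (k j : Nat),
      ((List.range k).foldl (fun r c => if E c then r else r.set c (v c)) row)[j]? =
        if j < k ∧ E j = false then row[j]?.map (fun _ => v j) else row[j]? := by
  intro k
  induction k with
  | zero => intro j; simp
  | succ k ih =>
    intro j
    rw [List.range_succ, List.foldl_append, List.foldl_cons, List.foldl_nil]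
    have hlen := length_foldl_rowset E v (List.range k) row
    by_cases hEk : E k = true
    · rw [if_pos hEk, ih j]
      by_cases hj : j < k ∧ E j = false
      · rw [if_pos hj, if_pos ⟨by omega, hj.2⟩]
      · have hneg : ¬ (j < k + 1 ∧ E j = false) := by
          intro hc
          by_cases hjk : j < k
          · exact hj ⟨hjk, hc.2⟩
          · have hje : j = k := by omega
            rw [hje] at hc
            rw [hc.2] at hEk
            cases hEk
        rw [if_neg hj, if_neg hneg]
    · have hEk' : E k = false := by revert hEk; cases E k <;> simp
      rw [if_neg hEk, List.getElem?_set]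
      by_cases hkj : k = j
      · subst hkj
        rw [if_pos rfl, hlen]
        cases hrow : row[k]? with
        | none =>
          have hl2 : row.length ≤ k := by
            by_contra hc
            rw [List.getElem?_eq_getElem (by omega)] at hrow
            cases hrow
          rw [if_neg (by omega), if_pos ⟨by omega, hEk'⟩]
          simp
        | some x =>
          have hl2 : k < row.length := by
            by_contra hc
            rw [List.getElem?_eq_none (by omega)] at hrow
            cases hrow
          rw [if_pos hl2, if_pos ⟨by omega, hEk'⟩]
          simp
      · rw [if_neg hkj, ih j]
        by_cases hj : j < k ∧ E j = false
        · rw [if_pos hj, if_pos ⟨by omega, hj.2⟩]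
        · have hneg : ¬ (j < k + 1 ∧ E j = false) := by
            intro hc
            exact hj ⟨by omega, hc.2⟩
          rw [if_neg hj, if_neg hneg]

-- a guarded set-loop over a row of length ≥ m: new cells followed by the untouched tail
theorem rowCols_eq_append (E : Nat → Bool) (v : Nat → Int) (row : List Int) (m : Nat)
    (hrow : m ≤ row.length) :
    (List.range m).foldl (fun r c => if E c then r else r.set c (v c)) row
      = (List.range m).map (fun c => if E c then row.getD c 0 else v c) ++ row.drop m := by
  apply List.ext_getElem?
  intro j
  rw [rowCols_getElem?]
  by_cases hj : j < m
  · have hjr : j < row.length := by omega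
    rw [List.getElem?_append_left (by simpa using hj), List.getElem?_map, List.getElem?_range hj]
    by_cases hE : E j = true
    · rw [if_neg (by simp [hE]), List.getElem?_eq_getElem hjr]
      simp [hE, List.getD_eq_getElem?_getD, List.getElem?_eq_getElem hjr]
    · have hE' : E j = false := by revert hE; cases E j <;> simp
      rw [if_pos ⟨hj, hE'⟩, List.getElem?_eq_getElem hjr]
      simp [hE']
  · rw [if_neg (fun hc => hj hc.1), List.getElem?_append_right (by simp; omega),
      List.getElem?_drop]
    congr 1
    simp
    omega

-- the unguarded set-loop (A's row branch): new cells followed by the untouched tail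
theorem setFold_eq_append (v : Nat → Int) (row : List Int) (m : Nat) (hrow : m ≤ row.length) :
    (List.range m).foldl (fun r c => r.set c (v c)) row
      = (List.range m).map v ++ row.drop m := by
  have h : (fun (r : List Int) (c : Nat) => r.set c (v c))
      = fun r c => if (fun (_ : Nat) => false) c then r else r.set c (v c) := by
    funext r c
    simp
  rw [h, rowCols_eq_append (fun _ => false) v row m hrow]
  simp

-- A's whole column-writing loop, cell by cell
theorem colFold_getElem? (n : Nat) (E : Nat → Bool) (w : Nat → Nat → Int)
    (grid : List (List Int)) (hn : grid.length = n) :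
    ∀ (k i : Nat),
      ((List.range k).foldl (fun out c => if E c then out
          else (List.range n).foldl (fun o r => o.set r ((o.getD r []).set c (w r c))) out) grid)[i]?
        = grid[i]?.map (fun row =>
            (List.range k).foldl (fun r c => if E c then r else r.set c (w i c)) row) := by
  intro k
  induction k with
  | zero => intro i; cases hgi : grid[i]? <;> simp [hgi]
  | succ k ih =>
    intro i
    simp only [List.range_succ, List.foldl_append, List.foldl_cons, List.foldl_nil]
    by_cases hEk : E k = true
    · rw [if_pos hEk, ih i]
      cases grid[i]? <;> simp [hEk]
    · rw [if_neg hEk, setRows_getElem? (fun r => w r k) k _ n i]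
      by_cases hi : i < n
      · rw [if_pos hi, ih i]
        cases hgi : grid[i]? with
        | none => simp
        | some row => simp [hEk]
      · have hgi : grid[i]? = none := List.getElem?_eq_none (by omega)
        rw [if_neg hi, ih i, hgi]
        simp

theorem colFold_eq_cellmap (n m : Nat) (E : Nat → Bool) (w : Nat → Nat → Int)
    (grid : List (List Int)) (hn : grid.length = n)
    (hrowlen : ∀ i, i < n → m ≤ (grid.getD i []).length) :
    (List.range m).foldl (fun out c => if E c then out
        else (List.range n).foldl (fun o r => o.set r ((o.getD r []).set c (w r c))) out) grid
      = (List.range n).map (fun r => (List.range m).map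
          (fun c => if E c then (grid.getD r []).getD c 0 else w r c) ++ (grid.getD r []).drop m) := by
  apply List.ext_getElem?
  intro i
  rw [colFold_getElem? n E w grid hn m i]
  by_cases hi : i < n
  · have higrid : i < grid.length := by omega
    rw [List.getElem?_eq_getElem higrid, List.getElem?_map, List.getElem?_range hi]
    simp only [Option.map_some]
    have hrl : m ≤ grid[i].length := by
      rw [← List.getD_eq_getElem grid [] higrid]
      exact hrowlen i hi
    rw [rowCols_eq_append E (fun c => w i c) grid[i] m hrl]
    rw [List.getD_eq_getElem grid [] higrid]
  · rw [List.getElem?_eq_none (by omega), List.getElem?_eq_none (by simp; omega)]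
    simp

theorem getD_map_col (grid : List (List Int)) (c r : Nat) (hr : r < grid.length) :
    (grid.map (fun row => row.getD c 0)).getD r 0 = (grid.getD r []).getD c 0 := by
  rw [List.getD_eq_getElem _ _ (by simpa using hr), List.getElem_map,
    List.getD_eq_getElem grid [] hr]

-- getD through a list-valued map
theorem getD_map_fn {α β : Type} (g : List α) (f : α → β) (r : Nat) (d : α) (d' : β)
    (hr : r < g.length) : (g.map f).getD r d' = f (g.getD r d) := by
  rw [List.getD_eq_getElem _ _ (by simpa using hr), List.getElem_map,
    List.getD_eq_getElem g d hr]

theorem getD_take (l : List Int) (w c : Nat) (hc : c < w) (hcl : c < l.length) :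
    (l.take w).getD c 0 = l.getD c 0 := by
  rw [List.getD_eq_getElem _ _ (by simp; omega), List.getElem_take,
    List.getD_eq_getElem l 0 hcl]

-- the first m cells of a long-enough row, as a range map
theorem range_map_getD_take (l : List Int) (m : Nat) (hm : m ≤ l.length) :
    (List.range m).map (fun c => l.getD c 0) = l.take m := by
  apply List.ext_getElem (by simp; omega)
  intro i h1 h2
  have hi : i < m := by simpa using h1
  simp [List.getElem_take, List.getD_eq_getElem?_getD,
    List.getElem?_eq_getElem (show i < l.length by omega)]

theorem headD_map_range {α : Type} (m : Nat) (F : Nat → α) (d : α) (hm : 0 < m) :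
    ((List.range m).map F).headD d = F 0 := by
  cases m with
  | zero => omega
  | succ k => rw [List.range_succ_eq_map, List.map_cons, List.headD_cons]

-- B's [list(col) for col in zip(*g)] on a rectangular nonempty grid
theorem zipStar_eq (g : List (List Int)) (hne : g ≠ [])
    (hrect : ∀ row ∈ g, row.length = (g.headD []).length) :
    pvZipStar g = (List.range (g.headD []).length).map (fun c => g.map (fun row => row.getD c 0)) := by
  cases g with
  | nil => exact absurd rfl hne
  | cons r0 rest =>
  simp only [List.headD_cons] at hrect ⊢
  simp only [pvZipStar]
  have hmin : ((r0 :: rest).map List.length).foldl min r0.length = r0.length := by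
    apply foldl_min_const
    intro x hx
    obtain ⟨row, hrow, rfl⟩ := List.mem_map.mp hx
    exact hrect row hrow
  rw [hmin]

-- a list find? expressed as a find? over its index range
theorem find?_index (g : List (List Int)) (p : List Int → Bool) :
    g.find? p = ((List.range g.length).find? (fun r => p (g.getD r []))).map
      (fun r => g.getD r []) := by
  induction g with
  | nil => rfl
  | cons a t ih =>
    rw [List.length_cons, List.range_succ_eq_map, List.find?_cons, List.find?_cons]
    simp only [List.getD_cons_zero]
    cases hp : p a with
    | true => rfl
    | false =>
      dsimp only
      rw [List.find?_map, ih, Option.map_map]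
      have hcong : (List.range t.length).find? ((fun r => p ((a :: t).getD r [])) ∘ Nat.succ)
          = (List.range t.length).find? (fun r => p (t.getD r [])) := by
        apply find?_congr
        intro x hx
        simp
      rw [hcong]
      cases (List.range t.length).find? (fun r => p (t.getD r [])) <;> simp

-- zipIdx as a map over the index range
theorem zipIdx_eq (l : List Int) :
    l.zipIdx = (List.range l.length).map (fun j => (l.getD j 0, j)) := by
  apply List.ext_getElem (by simp)
  intro i h1 h2
  have hi : i < l.length := by simpa using h1
  simp [List.getElem_zipIdx, List.getD_eq_getElem?_getD, List.getElem?_eq_getElem hi]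

-- the position index: class -> its positions in the reference line
theorem pos_getD (ref : List Int) (cls : Int) :
    PySem.Dict.getD (pvPos ref) cls []
      = (List.range ref.length).filter (fun j => ref.getD j 0 == cls) := by
  unfold pvPos
  rw [PySem.Dict.getD_foldl_modify_append, zipIdx_eq, List.filter_map]
  simp [Function.comp_def]

theorem pvFirst_filter (bg : Int) (row : List Int) (l : List Nat) (q : Nat → Bool) :
    pvFirst bg row (l.filter q)
      = match l.find? (fun j => q j && (row.getD j 0 != bg)) with
        | some j => row.getD j 0
        | none => bg := by
  unfold pvFirst
  rw [find?_of_filter]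

-- items of an insert are never empty
theorem insert_items_ne_nil (d : PySem.Dict Int Int) (k v : Int) :
    (d.insert k v).items ≠ [] := by
  by_cases hc : d.contains k = true
  · rw [PySem.Dict.items_insert_of_contains _ _ hc]
    intro h
    have hd : d.items = [] := by simpa using congrArg List.length h
    have : d = PySem.Dict.mk [] := PySem.Dict.ext (by simpa using hd)
    rw [this] at hc
    simp [PySem.Dict.contains_mk] at hc
  · rw [PySem.Dict.items_insert_of_not_contains _ _ (by simpa using hc)]
    simp

-- an empty first-seen dict means every value was background
theorem cv_empty (bg : Int) (K V : Nat → Int) (l : List Nat) :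
    ∀ d0 : PySem.Dict Int Int,
      ((l.foldl (fun d j => if V j != bg then
          (if PySem.Dict.contains d (K j) then d else d.insert (K j) (V j)) else d) d0).items = []) →
      d0.items = [] ∧ ∀ c ∈ l, (V c != bg) = false := by
  induction l with
  | nil => intro d0 h; exact ⟨h, by simp⟩
  | cons c t ih =>
    intro d0 h
    rw [List.foldl_cons] at h
    obtain ⟨hstep, hrest⟩ := ih _ h
    have hP : (V c != bg) = false := by
      by_contra hc
      have hP' : (V c != bg) = true := by revert hc; cases (V c != bg) <;> simp
      rw [if_pos hP'] at hstep
      by_cases hcon : PySem.Dict.contains d0 (K c) = true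
      · rw [if_pos hcon] at hstep
        have : d0 = PySem.Dict.mk [] := PySem.Dict.ext (by simpa using hstep)
        rw [this] at hcon
        simp [PySem.Dict.contains_mk] at hcon
      · rw [if_neg hcon] at hstep
        exact insert_items_ne_nil _ _ _ hstep
    rw [if_neg (by simp [hP])] at hstep
    refine ⟨hstep, ?_⟩
    intro x hx
    rcases List.mem_cons.mp hx with rfl | hx'
    · exact hP
    · exact hrest x hx'

-- lookup in A's first-seen dict: the value at the first index whose key matches
theorem cv_get? (bg : Int) (K V : Nat → Int) (l : List Nat) :
    ∀ (d0 : PySem.Dict Int Int) (k : Int),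
      (l.foldl (fun d j => if V j != bg then
          (if PySem.Dict.contains d (K j) then d else d.insert (K j) (V j)) else d) d0).get? k
        = (d0.get? k).or ((l.find? (fun j => (V j != bg) && (K j == k))).map V) := by
  induction l with
  | nil => intro d0 k; simp
  | cons c t ih =>
    intro d0 k
    rw [List.foldl_cons]
    by_cases hP : (V c != bg) = true
    · rw [if_pos hP]
      by_cases hK : (K c == k) = true
      · have hKk : K c = k := by simpa using hK
        subst hKk
        have hfind : List.find? (fun j => (V j != bg) && (K j == K c)) (c :: t) = some c := by
          simp [hP]
        rw [hfind]
        by_cases hc : PySem.Dict.contains d0 (K c) = true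
        · rw [if_pos hc, ih]
          rw [PySem.Dict.contains_eq_isSome_get?] at hc
          obtain ⟨v, hv⟩ := Option.isSome_iff_exists.mp hc
          rw [hv]
          rfl
        · rw [if_neg hc, ih, PySem.Dict.get?_insert_self]
          have hnone : d0.get? (K c) = none := by
            rw [PySem.Dict.contains_eq_isSome_get?] at hc
            revert hc
            cases d0.get? (K c) <;> simp
          rw [hnone]
          rfl
      · have hfind : List.find? (fun j => (V j != bg) && (K j == k)) (c :: t)
            = List.find? (fun j => (V j != bg) && (K j == k)) t := by
          simp [hK]
        rw [hfind]
        have hKne : k ≠ K c := by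
          intro he
          rw [he] at hK
          simp at hK
        by_cases hc : PySem.Dict.contains d0 (K c) = true
        · rw [if_pos hc, ih]
        · rw [if_neg hc, ih, PySem.Dict.get?_insert_of_ne _ _ hKne]
    · rw [if_neg hP]
      have hP' : (V c != bg) = false := by revert hP; cases (V c != bg) <;> simp
      have hfind : List.find? (fun j => (V j != bg) && (K j == k)) (c :: t)
          = List.find? (fun j => (V j != bg) && (K j == k)) t := by
        simp [hP']
      rw [hfind, ih]

-- the common per-cell value of both programs
def pvCell (bg : Int) (K V : Nat → Int) (n : Nat) (q : Nat) : Int :=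
  match (List.range n).find? (fun j => (K j == K q) && (V j != bg)) with
  | some j => V j
  | none => bg

theorem pvCell_congr (bg : Int) (K V K' V' : Nat → Int) (m q : Nat)
    (hK : ∀ j, j < m → K j = K' j) (hV : ∀ j, j < m → V j = V' j) (hq : q < m) :
    pvCell bg K V m q = pvCell bg K' V' m q := by
  unfold pvCell
  apply match_find_congr
  · intro j hj
    rw [hK j (List.mem_range.mp hj), hK q hq, hV j (List.mem_range.mp hj)]
  · intro j hj
    exact hV j (List.mem_range.mp hj)

-- A's per-line computation (first-seen dict, empty test, lookup with default) gives pvCell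
theorem cell_eq (bg : Int) (K V : Nat → Int) (n q : Nat) (hq : q < n) :
    (if ((List.range n).foldl (fun d j => if V j != bg then
          (if PySem.Dict.contains d (K j) then d else d.insert (K j) (V j)) else d)
          PySem.Dict.empty).items.isEmpty
     then V q
     else PySem.Dict.getD ((List.range n).foldl (fun d j => if V j != bg then
          (if PySem.Dict.contains d (K j) then d else d.insert (K j) (V j)) else d)
          PySem.Dict.empty) (K q) bg)
      = pvCell bg K V n q := by
  by_cases he : ((List.range n).foldl (fun d j => if V j != bg then
      (if PySem.Dict.contains d (K j) then d else d.insert (K j) (V j)) else d)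
      PySem.Dict.empty).items.isEmpty = true
  · rw [if_pos he]
    obtain ⟨-, hall⟩ := cv_empty bg K V (List.range n) PySem.Dict.empty
      (List.isEmpty_iff.mp he)
    have hfind : (List.range n).find? (fun j => (K j == K q) && (V j != bg)) = none := by
      rw [List.find?_eq_none]
      intro x hx
      simp [hall x hx]
    unfold pvCell
    rw [hfind]
    have := hall q (List.mem_range.mpr hq)
    simpa using this
  · rw [if_neg he, PySem.Dict.getD_eq_get?_getD, cv_get?, PySem.Dict.get?_empty]
    unfold pvCell
    rw [find?_congr (List.range n) _ (fun j => (K j == K q) && (V j != bg))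
      (fun x _ => Bool.and_comm _ _)]
    cases (List.range n).find? (fun j => (K j == K q) && (V j != bg)) <;> rfl

-- B's per-cell value via the position index is pvCell too
theorem bcell_eq (bg : Int) (row ref : List Int) (m : Nat) (href : ref.length = m) (c : Nat) :
    pvFirst bg row (PySem.Dict.getD (pvPos ref) (ref.getD c 0) [])
      = pvCell bg (fun j => ref.getD j 0) (fun j => row.getD j 0) m c := by
  rw [pos_getD, href, pvFirst_filter]
  rfl

-- A's whole-row computation (empty test at row level, in-place writes) as pvCell cells + tail
theorem rowline_eq (bg : Int) (ref row : List Int) (m : Nat) (hrl : m ≤ row.length) :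
    (if ((List.range m).foldl (fun d c => if row.getD c 0 != bg then
          (if PySem.Dict.contains d (ref.getD c 0) then d
           else d.insert (ref.getD c 0) (row.getD c 0)) else d) PySem.Dict.empty).items.isEmpty
     then row
     else (List.range m).foldl (fun rw c => rw.set c (PySem.Dict.getD
        ((List.range m).foldl (fun d c => if row.getD c 0 != bg then
          (if PySem.Dict.contains d (ref.getD c 0) then d
           else d.insert (ref.getD c 0) (row.getD c 0)) else d) PySem.Dict.empty)
        (ref.getD c 0) bg)) row)
      = (List.range m).map
          (fun c => pvCell bg (fun j => ref.getD j 0) (fun j => row.getD j 0) m c)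
        ++ row.drop m := by
  by_cases hemp : ((List.range m).foldl (fun d c => if row.getD c 0 != bg then
      (if PySem.Dict.contains d (ref.getD c 0) then d
       else d.insert (ref.getD c 0) (row.getD c 0)) else d) PySem.Dict.empty).items.isEmpty = true
  · rw [if_pos hemp]
    have hcells : ∀ c ∈ List.range m,
        pvCell bg (fun j => ref.getD j 0) (fun j => row.getD j 0) m c = row.getD c 0 := by
      intro c hc
      have h1 := cell_eq bg (fun j => ref.getD j 0) (fun j => row.getD j 0) m c
        (List.mem_range.mp hc)
      rw [if_pos hemp] at h1
      exact h1.symm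
    rw [List.map_congr_left hcells, range_map_getD_take row m hrl, List.take_append_drop]
  · rw [if_neg hemp, setFold_eq_append _ row m hrl]
    congr 1
    apply List.map_congr_left
    intro c hc
    have h1 := cell_eq bg (fun j => ref.getD j 0) (fun j => row.getD j 0) m c
      (List.mem_range.mp hc)
    rw [if_neg hemp] at h1
    exact h1

-- zipping an index-range map with the grid and appending tails, elementwise
theorem zip_map_append (n w : Nat) (F : Nat → List Int) (g : List (List Int))
    (hg : g.length = n) :
    (((List.range n).map F).zip g).map (fun p => p.1 ++ p.2.drop w)
      = (List.range n).map (fun r => F r ++ (g.getD r []).drop w) := by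
  apply List.ext_getElem (by simp [hg])
  intro i h1 h2
  have hi : i < n := by simpa using h2
  have hig : i < g.length := by omega
  simp [List.getElem_zip, List.getD_eq_getElem?_getD, List.getElem?_eq_getElem hig]

-- the left block: row r of grid.map (take w), its length and cells
theorem left_getD (grid : List (List Int)) (w r : Nat) (hr : r < grid.length) :
    (grid.map (fun row => row.take w)).getD r [] = (grid.getD r []).take w :=
  getD_map_fn grid (fun row => row.take w) r [] [] hr

-- the complete-row branch
theorem rowBranch_eq (grid : List (List Int)) (bg : Int) (R : Nat) (hRn : R < grid.length)
    (hlen : ∀ r, r < grid.length → (grid.headD []).length ≤ (grid.getD r []).length) :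
    (List.range grid.length).map (fun r =>
      let cv := (List.range (grid.headD []).length).foldl (fun d c =>
        if ((grid.getD r []).getD c 0) != bg then
          (if PySem.Dict.contains d ((grid.getD R []).getD c 0) then d
           else d.insert ((grid.getD R []).getD c 0) ((grid.getD r []).getD c 0))
        else d) PySem.Dict.empty
      if cv.items.isEmpty then grid.getD r []
      else (List.range (grid.headD []).length).foldl (fun row c =>
        row.set c (PySem.Dict.getD cv ((grid.getD R []).getD c 0) bg)) (grid.getD r []))
      = ((pvRewrite bg (grid.map (fun row => row.take (grid.headD []).length))
            ((grid.map (fun row => row.take (grid.headD []).length)).getD R [])).zip grid).map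
          (fun p => p.1 ++ p.2.drop (grid.headD []).length) := by
  have hRlen : (grid.headD []).length ≤ (grid.getD R []).length := hlen R hRn
  have hlref : ((grid.getD R []).take (grid.headD []).length).length = (grid.headD []).length := by
    rw [List.length_take]
    exact Nat.min_eq_left hRlen
  -- B's rewrite of the left block, as a range map of grid-expressed pvCells
  have hB : pvRewrite bg (grid.map (fun row => row.take (grid.headD []).length))
        ((grid.map (fun row => row.take (grid.headD []).length)).getD R [])
      = (List.range grid.length).map (fun r =>
          (List.range (grid.headD []).length).map (fun c =>
            pvCell bg (fun j => (grid.getD R []).getD j 0)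
              (fun j => (grid.getD r []).getD j 0) (grid.headD []).length c)) := by
    simp only [pvRewrite]
    rw [left_getD grid _ R hRn, List.map_map]
    simp only [Function.comp_def]
    rw [← map_range_getD grid (fun row =>
      ((grid.getD R []).take (grid.headD []).length).map
        (fun cls => pvFirst bg (row.take (grid.headD []).length)
          (PySem.Dict.getD (pvPos ((grid.getD R []).take (grid.headD []).length)) cls []))) []]
    apply List.map_congr_left
    intro r hr
    have hrn := List.mem_range.mp hr
    rw [← map_range_getD ((grid.getD R []).take (grid.headD []).length)
      (fun cls => pvFirst bg ((grid.getD r []).take (grid.headD []).length)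
        (PySem.Dict.getD (pvPos ((grid.getD R []).take (grid.headD []).length)) cls [])) 0, hlref]
    apply List.map_congr_left
    intro c hc
    have hcm := List.mem_range.mp hc
    exact (bcell_eq bg ((grid.getD r []).take (grid.headD []).length)
        ((grid.getD R []).take (grid.headD []).length) (grid.headD []).length hlref c).trans
      (pvCell_congr bg _ _ _ _ (grid.headD []).length c
        (fun j hj => getD_take _ _ j hj (by omega))
        (fun j hj => getD_take _ _ j hj (by have := hlen r hrn; omega)) hcm)
  rw [hB, zip_map_append grid.length (grid.headD []).length _ grid rfl]
  apply List.map_congr_left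
  intro r hr
  have hrn := List.mem_range.mp hr
  exact rowline_eq bg (grid.getD R []) (grid.getD r []) (grid.headD []).length (hlen r hrn)

-- the complete-column branch: A's in-place column writes equal B's transpose → rewrite → transpose
theorem colBranch_eq (grid : List (List Int)) (bg : Int) (C : Nat) (hne : grid ≠ [])
    (hlen : ∀ r, r < grid.length → (grid.headD []).length ≤ (grid.getD r []).length)
    (hCm : C < (grid.headD []).length) :
    (List.range (grid.headD []).length).foldl (fun out c =>
      let cv := (List.range grid.length).foldl (fun d r =>
        if ((grid.getD r []).getD c 0) != bg then
          (if PySem.Dict.contains d ((grid.getD r []).getD C 0) then d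
           else d.insert ((grid.getD r []).getD C 0) ((grid.getD r []).getD c 0))
        else d) PySem.Dict.empty
      if cv.items.isEmpty then out
      else (List.range grid.length).foldl (fun out r =>
        out.set r ((out.getD r []).set c
          (PySem.Dict.getD cv ((grid.getD r []).getD C 0) bg))) out) grid
      = ((pvZipStar (pvRewrite bg (pvZipStar (grid.map (fun row => row.take (grid.headD []).length)))
            ((pvZipStar (grid.map (fun row => row.take (grid.headD []).length))).getD C []))).zip
          grid).map (fun p => p.1 ++ p.2.drop (grid.headD []).length) := by
  have hm0 : 0 < (grid.headD []).length := by omega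
  have hlne : (grid.map (fun row => row.take (grid.headD []).length)) ≠ [] := by
    simpa using hne
  have hlhead : ((grid.map (fun row => row.take (grid.headD []).length)).headD []).length
      = (grid.headD []).length := by
    cases grid with
    | nil => exact absurd rfl hne
    | cons a rest => simp
  have hlrect : ∀ row ∈ (grid.map (fun row => row.take (grid.headD []).length)),
      row.length = ((grid.map (fun row => row.take (grid.headD []).length)).headD []).length := by
    intro row hrow
    obtain ⟨orow, ho, rfl⟩ := List.mem_map.mp hrow
    rw [hlhead]
    have : (grid.headD []).length ≤ orow.length := by
      obtain ⟨i, hi, rfl⟩ := List.getElem_of_mem ho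
      have := hlen i (by omega)
      rw [List.getD_eq_getElem grid [] (by omega)] at this
      exact this
    rw [List.length_take]
    exact Nat.min_eq_left this
  have ht := zipStar_eq (grid.map (fun row => row.take (grid.headD []).length)) hlne hlrect
  rw [hlhead] at ht
  have htget : ∀ c, c < (grid.headD []).length →
      (pvZipStar (grid.map (fun row => row.take (grid.headD []).length))).getD c []
        = (grid.map (fun row => row.take (grid.headD []).length)).map (fun row => row.getD c 0) := by
    intro c hc
    rw [ht, List.getD_eq_getElem _ [] (by simpa using hc)]
    simp
  have hcol := htget C hCm
  have hlget : ∀ r, r < grid.length → ∀ c, c < (grid.headD []).length →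
      ((grid.map (fun row => row.take (grid.headD []).length)).getD r []).getD c 0
        = (grid.getD r []).getD c 0 := by
    intro r hr c hc
    rw [left_getD grid _ r hr]
    exact getD_take _ _ c hc (by have := hlen r hr; omega)
  -- Step 1: B's rewrite of the transposed left block, cell by cell
  have hB1 : pvRewrite bg (pvZipStar (grid.map (fun row => row.take (grid.headD []).length)))
        ((pvZipStar (grid.map (fun row => row.take (grid.headD []).length))).getD C [])
      = (List.range (grid.headD []).length).map (fun c =>
          (List.range grid.length).map (fun r =>
            pvCell bg (fun j => (grid.getD j []).getD C 0)
              (fun j => (grid.getD j []).getD c 0) grid.length r)) := by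
    simp only [pvRewrite]
    rw [hcol]
    conv_lhs => rw [ht, List.map_map]
    apply List.map_congr_left
    intro c hc
    have hcm := List.mem_range.mp hc
    simp only [Function.comp_def]
    rw [← map_range_getD ((grid.map (fun row => row.take (grid.headD []).length)).map
        (fun row => row.getD C 0))
      (fun cls => pvFirst bg ((grid.map (fun row => row.take (grid.headD []).length)).map
        (fun row => row.getD c 0))
        (PySem.Dict.getD (pvPos ((grid.map (fun row => row.take (grid.headD []).length)).map
          (fun row => row.getD C 0))) cls [])) 0]
    simp only [List.length_map]
    apply List.map_congr_left
    intro r hr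
    have hrn := List.mem_range.mp hr
    have hkey : ((grid.map (fun row => row.take (grid.headD []).length)).map
        (fun row => row.getD C 0)).getD r 0 = (grid.getD r []).getD C 0 := by
      rw [getD_map_col _ C r (by simpa using hrn)]
      exact hlget r hrn C hCm
    rw [hkey, pos_getD]
    simp only [List.length_map]
    rw [pvFirst_filter]
    unfold pvCell
    apply match_find_congr
    · intro j hj
      have hjn := List.mem_range.mp hj
      rw [getD_map_col _ C j (by simpa using hjn), hlget j hjn C hCm,
        getD_map_col _ c j (by simpa using hjn), hlget j hjn c hcm]
    · intro j hj
      have hjn := List.mem_range.mp hj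
      rw [getD_map_col _ c j (by simpa using hjn), hlget j hjn c hcm]
  -- Step 2: the outer transpose of that rectangular matrix
  have hne' : ((List.range (grid.headD []).length).map (fun c =>
      (List.range grid.length).map (fun r =>
        pvCell bg (fun j => (grid.getD j []).getD C 0)
          (fun j => (grid.getD j []).getD c 0) grid.length r))) ≠ [] := by
    apply List.ne_nil_of_length_pos
    simpa using hm0
  have hrect' : ∀ row ∈ ((List.range (grid.headD []).length).map (fun c =>
      (List.range grid.length).map (fun r =>
        pvCell bg (fun j => (grid.getD j []).getD C 0)
          (fun j => (grid.getD j []).getD c 0) grid.length r))),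
      row.length = (((List.range (grid.headD []).length).map (fun c =>
        (List.range grid.length).map (fun r =>
          pvCell bg (fun j => (grid.getD j []).getD C 0)
            (fun j => (grid.getD j []).getD c 0) grid.length r))).headD []).length := by
    intro row hrow
    obtain ⟨c, hc, rfl⟩ := List.mem_map.mp hrow
    rw [headD_map_range _ _ _ hm0]
    simp
  rw [hB1, zipStar_eq _ hne' hrect', headD_map_range _ _ _ hm0]
  simp only [List.length_map, List.length_range]
  rw [zip_map_append grid.length (grid.headD []).length _ grid rfl]
  -- Step 3: A's fold, cell by cell, then pointwise equality
  refine (colFold_eq_cellmap grid.length (grid.headD []).length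
      (fun c => ((List.range grid.length).foldl (fun d r =>
        if ((grid.getD r []).getD c 0) != bg then
          (if PySem.Dict.contains d ((grid.getD r []).getD C 0) then d
           else d.insert ((grid.getD r []).getD C 0) ((grid.getD r []).getD c 0))
        else d) PySem.Dict.empty).items.isEmpty)
      (fun r c => PySem.Dict.getD ((List.range grid.length).foldl (fun d r =>
        if ((grid.getD r []).getD c 0) != bg then
          (if PySem.Dict.contains d ((grid.getD r []).getD C 0) then d
           else d.insert ((grid.getD r []).getD C 0) ((grid.getD r []).getD c 0))
        else d) PySem.Dict.empty) ((grid.getD r []).getD C 0) bg)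
      grid rfl (fun i hi => hlen i hi)).trans ?_
  apply List.map_congr_left
  intro r hr
  have hrn := List.mem_range.mp hr
  congr 1
  rw [List.map_map]
  apply List.map_congr_left
  intro c hc
  simp only [Function.comp_def]
  rw [List.getD_eq_getElem ((List.range grid.length).map (fun r' =>
      pvCell bg (fun j => (grid.getD j []).getD C 0)
        (fun j => (grid.getD j []).getD c 0) grid.length r')) 0 (by simpa using hrn)]
  simp only [List.getElem_map, List.getElem_range]
  exact cell_eq bg (fun j => (grid.getD j []).getD C 0)
    (fun j => (grid.getD j []).getD c 0) grid.length r hrn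

-- ===== VERDICT (by name: the statement is the Claim_ definition above) =====
theorem transform_spec : Claim_equal_transform := by
  intro grid _ hpre
  unfold Spec_transform
  obtain ⟨hne, hrect, -⟩ := hpre
  have hlen : ∀ r, r < grid.length → (grid.headD []).length ≤ (grid.getD r []).length := by
    intro r hr
    rw [List.getD_eq_getElem grid [] hr]
    exact hrect _ (List.getElem_mem hr)
  have hleftlen : (grid.map (fun row => row.take (grid.headD []).length)).length = grid.length := by
    simp
  have hleftrow : ∀ r, r < grid.length →
      ((grid.map (fun row => row.take (grid.headD []).length)).getD r []).length
        = (grid.headD []).length := by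
    intro r hr
    rw [left_getD grid _ r hr, List.length_take]
    exact Nat.min_eq_left (hlen r hr)
  have hlget : ∀ r, r < grid.length → ∀ c, c < (grid.headD []).length →
      ((grid.map (fun row => row.take (grid.headD []).length)).getD r []).getD c 0
        = (grid.getD r []).getD c 0 := by
    intro r hr c hc
    rw [left_getD grid _ r hr]
    exact getD_take _ _ c hc (by have := hlen r hr; omega)
  simp only [transform, transform_alt]
  -- align the two row searches
  have hrowsearch : (grid.map (fun row => row.take (grid.headD []).length)).find?
        (fun lrow => lrow.all (fun v => v != pvBg (grid.flatMap fun row => row)))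
      = ((List.range grid.length).find? (fun r => (List.range (grid.headD []).length).all
          (fun c => ((grid.getD r []).getD c 0) != pvBg (grid.flatMap fun row => row)))).map
        (fun r => (grid.map (fun row => row.take (grid.headD []).length)).getD r []) := by
    rw [find?_index, hleftlen]
    congr 1
    apply find?_congr
    intro r hr
    have hrn := List.mem_range.mp hr
    rw [← all_range_getD ((grid.map (fun row => row.take (grid.headD []).length)).getD r [])
      (fun v => v != pvBg (grid.flatMap fun row => row)) 0, hleftrow r hrn]
    apply all_congr_mem
    intro c hc
    rw [hlget r hrn c (List.mem_range.mp hc)]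
  rw [hrowsearch]
  cases hfind : (List.range grid.length).find? (fun r =>
      (List.range (grid.headD []).length).all (fun c =>
        ((grid.getD r []).getD c 0) != pvBg (grid.flatMap fun row => row))) with
  | some R =>
    have hRn : R < grid.length := List.mem_range.mp (List.mem_of_find?_eq_some hfind)
    simpa using rowBranch_eq grid (pvBg (grid.flatMap fun row => row)) R hRn hlen
  | none =>
    have hlne : (grid.map (fun row => row.take (grid.headD []).length)) ≠ [] := by
      simpa using hne
    have hlhead : ((grid.map (fun row => row.take (grid.headD []).length)).headD []).length
        = (grid.headD []).length := by
      cases grid with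
      | nil => exact absurd rfl hne
      | cons a rest =>
        simp
    have hlrect : ∀ row ∈ (grid.map (fun row => row.take (grid.headD []).length)),
        row.length = ((grid.map (fun row => row.take (grid.headD []).length)).headD []).length := by
      intro row hrow
      obtain ⟨orow, ho, rfl⟩ := List.mem_map.mp hrow
      rw [hlhead]
      have : (grid.headD []).length ≤ orow.length := hrect orow ho
      rw [List.length_take]
      exact Nat.min_eq_left this
    have ht := zipStar_eq (grid.map (fun row => row.take (grid.headD []).length)) hlne hlrect
    rw [hlhead] at ht
    have htlen : (pvZipStar (grid.map (fun row => row.take (grid.headD []).length))).length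
        = (grid.headD []).length := by rw [ht]; simp
    have htget : ∀ c, c < (grid.headD []).length →
        (pvZipStar (grid.map (fun row => row.take (grid.headD []).length))).getD c []
          = (grid.map (fun row => row.take (grid.headD []).length)).map
              (fun row => row.getD c 0) := by
      intro c hc
      rw [ht, List.getD_eq_getElem _ [] (by simpa using hc)]
      simp
    -- align the two column searches
    have hcolsearch : (pvZipStar (grid.map (fun row => row.take (grid.headD []).length))).find?
        (fun col => col.all (fun v => v != pvBg (grid.flatMap fun row => row)))
        = ((List.range (grid.headD []).length).find? (fun c => (List.range grid.length).all
            (fun r => ((grid.getD r []).getD c 0) != pvBg (grid.flatMap fun row => row)))).map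
          (fun c => (pvZipStar (grid.map (fun row => row.take (grid.headD []).length))).getD c []) := by
      rw [find?_index, htlen]
      congr 1
      apply find?_congr
      intro c hc
      have hcm := List.mem_range.mp hc
      rw [htget c hcm, List.all_map,
        ← all_range_getD (grid.map (fun row => row.take (grid.headD []).length))
          ((fun v => v != pvBg (grid.flatMap fun row => row)) ∘ (fun row => row.getD c 0)) [],
        hleftlen]
      apply all_congr_mem
      intro r hr
      have hrn := List.mem_range.mp hr
      simp only [Function.comp_def]
      rw [hlget r hrn c hcm]
    rw [hcolsearch]
    cases hfind2 : (List.range (grid.headD []).length).find? (fun c =>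
        (List.range grid.length).all (fun r =>
          ((grid.getD r []).getD c 0) != pvBg (grid.flatMap fun row => row))) with
    | some C =>
      have hCm : C < (grid.headD []).length :=
        List.mem_range.mp (List.mem_of_find?_eq_some hfind2)
      simpa using colBranch_eq grid (pvBg (grid.flatMap fun row => row)) C hne hlen hCm
    | none => exact (List.map_id' grid).symm
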